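-- pv_equiv track=rewrite | github.com/Lecrut/Diffusion-code-generation | data/code/13_13_7.py | calculate_net_time_difference
-- ===== SOURCE A (Python) =====
-- def calculate_net_time_difference(time_string, delimiter=';'):
--     time_points = []
--     if not time_string:
--         return 0
--     time_segments = time_string.split(delimiter)
--     for segment in time_segments:
--         try:
--             time_points.append(int(segment))
--         except ValueError:
--             continue
--     if not time_points:
--         return 0
--     min_time = min(time_points)
--     max_time = max(time_points)
--     return max_time - min_time
-- ===== SOURCE B (Python) =====
-- def calculate_net_time_difference(time_string, delimiter=';'):
--     if not time_string:
--         return 0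
--     lo = hi = None
--     for segment in time_string.split(delimiter):
--         try:
--             v = int(segment)
--         except ValueError:
--             continue
--         if lo is None:
--             lo = hi = v
--         else:
--             if v < lo:
--                 lo = v
--             if hi < v:
--                 hi = v
--     return 0 if lo is None else hi - lo
-- ===== Notes on version B (the rewrite author's own statement) =====
-- stated objective: alternative
-- what changed: Single pass keeping running lo/hi while parsing segments, replacing the intermediate list plus separate min() and max() scans.
import Mathlib
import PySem

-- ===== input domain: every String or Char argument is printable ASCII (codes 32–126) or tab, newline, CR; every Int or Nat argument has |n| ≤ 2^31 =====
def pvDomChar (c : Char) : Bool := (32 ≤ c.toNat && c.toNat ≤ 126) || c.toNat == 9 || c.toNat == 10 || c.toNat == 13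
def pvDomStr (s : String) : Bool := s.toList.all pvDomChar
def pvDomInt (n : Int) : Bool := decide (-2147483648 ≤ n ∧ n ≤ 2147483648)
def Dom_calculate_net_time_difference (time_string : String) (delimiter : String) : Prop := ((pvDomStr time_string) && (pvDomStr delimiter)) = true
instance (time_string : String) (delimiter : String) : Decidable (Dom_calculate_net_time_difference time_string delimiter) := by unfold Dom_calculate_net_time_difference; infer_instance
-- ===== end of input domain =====

-- B: one pass maintaining running lo/hi instead of building a list and scanning it twice (alternative decomposition).
-- ===== PORT A =====
def calculate_net_time_difference (time_string : String) (delimiter : String) : Int :=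
  if time_string = "" then 0
  else
    match PySem.Str.split? time_string delimiter with
    | none => 0  -- delimiter = "": Python raises ValueError; excluded by Pre_
    | some time_segments =>
      let time_points := time_segments.foldl (fun acc segment =>
        match PySem.Int.ofStr? segment with
        | some v => acc ++ [v]
        | none => acc) []
      if time_points = [] then 0
      else
        match PySem.List.min? time_points (fun x => x), PySem.List.max? time_points (fun x => x) with
        | some min_time, some max_time => max_time - min_time
        | _, _ => 0  -- unreachable: time_points ≠ []

-- ===== PORT B =====
def pvStepB (st : Option (Int × Int)) (v : Int) : Option (Int × Int) :=
  match st with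
  | none => some (v, v)
  | some (lo, hi) => some (if v < lo then v else lo, if hi < v then v else hi)

def calculate_net_time_difference_alt (time_string : String) (delimiter : String) : Int :=
  if time_string = "" then 0
  else
    match PySem.Str.split? time_string delimiter with
    | none => 0  -- delimiter = "": Python raises ValueError; excluded by Pre_
    | some segments =>
      let st := segments.foldl (fun st segment =>
        match PySem.Int.ofStr? segment with
        | some v => pvStepB st v
        | none => st) none
      match st with
      | none => 0
      | some (lo, hi) => hi - lo

-- ===== PRECONDITION & SPEC =====
-- Pre_ excludes exactly delimiter = "" with nonempty time_string, where Python's str.split raises ValueError.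
def Pre_calculate_net_time_difference (time_string : String) (delimiter : String) : Prop :=
  time_string = "" ∨ delimiter ≠ ""
instance (time_string : String) (delimiter : String) : Decidable (Pre_calculate_net_time_difference time_string delimiter) := by unfold Pre_calculate_net_time_difference; infer_instance
def pvWitness_calculate_net_time_difference : String × String := ("1;5;x", ";")
def Spec_calculate_net_time_difference (time_string : String) (delimiter : String) (out : Int) : Prop := out = calculate_net_time_difference_alt time_string delimiter
instance (time_string : String) (delimiter : String) (out : Int) : Decidable (Spec_calculate_net_time_difference time_string delimiter out) := by unfold Spec_calculate_net_time_difference; infer_instance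

-- ===== CLAIM (what is proved, stated in full; the proofs are below) =====
def Claim_equal_calculate_net_time_difference : Prop := ∀ (time_string : String) (delimiter : String), Dom_calculate_net_time_difference time_string delimiter → Pre_calculate_net_time_difference time_string delimiter → Spec_calculate_net_time_difference time_string delimiter (calculate_net_time_difference time_string delimiter)

-- ===== LEMMAS AND PROOFS =====
-- A's accumulating loop builds exactly the filterMap of the parsed segments.
theorem pvAfold_eq (segs : List String) (acc : List Int) :
    segs.foldl (fun acc segment =>
        match PySem.Int.ofStr? segment with
        | some v => acc ++ [v]
        | none => acc) acc = acc ++ segs.filterMap PySem.Int.ofStr? := by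
  induction segs generalizing acc with
  | nil => simp
  | cons s t ih =>
    simp only [List.foldl_cons, List.filterMap_cons]
    cases PySem.Int.ofStr? s <;> simp [ih]

-- B's loop over segments is the fold of pvStepB over the parsed values.
theorem pvBfold_eq (segs : List String) (st : Option (Int × Int)) :
    segs.foldl (fun st segment =>
        match PySem.Int.ofStr? segment with
        | some v => pvStepB st v
        | none => st) st = (segs.filterMap PySem.Int.ofStr?).foldl pvStepB st := by
  induction segs generalizing st with
  | nil => rfl
  | cons s t ih =>
    simp only [List.foldl_cons, List.filterMap_cons]
    cases PySem.Int.ofStr? s <;> simp [ih]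

theorem pvStep_fold (t : List Int) (lo hi : Int) :
    t.foldl pvStepB (some (lo, hi)) = some (t.foldl min lo, t.foldl max hi) := by
  induction t generalizing lo hi with
  | nil => rfl
  | cons v t ih =>
    have hlo : (if v < lo then v else lo) = min lo v := by split_ifs <;> omega
    have hhi : (if hi < v then v else hi) = max hi v := by split_ifs <;> omega
    simp only [List.foldl_cons, pvStepB, hlo, hhi, ih]

-- ===== VERDICT (by name: the statement is the Claim_ definition above) =====
theorem calculate_net_time_difference_spec : Claim_equal_calculate_net_time_difference := by
  intro ts delim _ _
  unfold Spec_calculate_net_time_difference calculate_net_time_difference calculate_net_time_difference_alt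
  by_cases hts : ts = ""
  · simp [hts]
  · simp only [hts, if_false]
    cases hsp : PySem.Str.split? ts delim with
    | none => rfl
    | some segs =>
      simp only [pvAfold_eq, pvBfold_eq, List.nil_append]
      cases hpts : segs.filterMap PySem.Int.ofStr? with
      | nil => rfl
      | cons p t =>
        simp [List.foldl_cons, pvStepB, pvStep_fold,
          PySem.List.min?_id_cons, PySem.List.max?_id_cons]
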